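-- pv_equiv track=rewrite | github.com/BrastoRR/bh67 | 6.1.py | number_convert
-- ===== SOURCE A (Python) =====
-- def number_convert(number):
--     binary = ''
--     while number > 1:
--         binary = f'{number % 2}' + binary
--         number //= 2
--     binary = f'{number}' + binary
--     to_decimal = binary[::-1]
--     decimal = 0
--     for i in range(len(to_decimal)):
--         if to_decimal[i] == '1':
--             decimal = (2 ** i) + decimal
--     return binary, decimal
-- ===== SOURCE B (Python) =====
-- def number_convert(number):
--     def digits(n):
--         if n > 1:
--             return digits(n // 2) + [str(n % 2)]
--         return [str(n)]
--     binary = ''.join(digits(number))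
--     decimal = 0
--     for ch in binary:
--         decimal = decimal * 2 + (1 if ch == '1' else 0)
--     return binary, decimal
-- ===== Notes on version B (the rewrite author's own statement) =====
-- stated objective: alternative
-- what changed: The binary string is built by structural recursion (returning a digit list that is joined once) instead of A's while-loop of string prepends, and the decimal value is computed by a single left-to-right Horner pass (decimal = decimal*2 + bit) instead of A's reversed-string index loop with explicit powers 2**i.
import Mathlib
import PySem

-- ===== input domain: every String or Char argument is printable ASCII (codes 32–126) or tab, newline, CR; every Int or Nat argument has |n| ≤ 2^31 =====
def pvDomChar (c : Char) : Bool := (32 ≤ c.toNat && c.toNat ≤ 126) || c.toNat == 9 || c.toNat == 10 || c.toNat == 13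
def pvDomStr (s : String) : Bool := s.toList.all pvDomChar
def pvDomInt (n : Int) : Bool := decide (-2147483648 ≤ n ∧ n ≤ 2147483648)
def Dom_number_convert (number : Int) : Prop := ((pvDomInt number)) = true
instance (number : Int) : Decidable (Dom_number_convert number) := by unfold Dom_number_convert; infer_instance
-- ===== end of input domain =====

-- B builds the binary digits by structural recursion (joined once) instead of A's while-loop of
-- string prepends, and computes the decimal value by a single Horner pass instead of A's
-- reversed-string index loop with powers 2**i; objective: alternative (same asymptotic cost).

-- ===== PORT A =====
-- the while-loop: state (number, binary); returns (final number, accumulated binary chars)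
def aLoop (number : Int) (binary : List Char) : Int × List Char :=
  if number > 1 then
    aLoop (PySem.Int.floordiv number 2) (PySem.Int.toChars (PySem.Int.mod number 2) ++ binary)
  else (number, binary)
termination_by number.toNat
decreasing_by
  rw [PySem.Int.floordiv_eq_ediv_of_pos (by omega)]
  omega

def number_convert (number : Int) : String × Int :=
  let r := aLoop number []
  let binary : List Char := PySem.Int.toChars r.1 ++ r.2   -- binary = f'{number}' + binary
  let toDecimal := binary.reverse                           -- binary[::-1]
  -- for i in range(len(to_decimal)): if to_decimal[i] == '1': decimal = (2 ** i) + decimal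
  -- (the index i is always in range, so getD is exact)
  let decimal : Int :=
    (List.range toDecimal.length).foldl
      (fun d i => if toDecimal.getD i ' ' = '1' then 2 ^ i + d else d) 0
  (String.ofList binary, decimal)

-- ===== PORT B =====
-- def digits(n): return digits(n//2) + [str(n%2)] if n > 1 else [str(n)]   (joined to a string)
def bDigits (n : Int) : List Char :=
  if n > 1 then
    bDigits (PySem.Int.floordiv n 2) ++ PySem.Int.toChars (PySem.Int.mod n 2)
  else PySem.Int.toChars n
termination_by n.toNat
decreasing_by
  rw [PySem.Int.floordiv_eq_ediv_of_pos (by omega)]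
  omega

def number_convert_alt (number : Int) : String × Int :=
  let binary := bDigits number
  -- for ch in binary: decimal = decimal * 2 + (1 if ch == '1' else 0)
  let decimal : Int := binary.foldl (fun d ch => d * 2 + (if ch = '1' then 1 else 0)) 0
  (String.ofList binary, decimal)

-- ===== PRECONDITION & SPEC =====
def Spec_number_convert (number : Int) (out : String × Int) : Prop := out = number_convert_alt number
instance (number : Int) (out : String × Int) : Decidable (Spec_number_convert number out) := by unfold Spec_number_convert; infer_instance

-- ===== CLAIM (what is proved, stated in full; the proofs are below) =====
def Claim_equal_number_convert : Prop := ∀ (number : Int), Dom_number_convert number → Spec_number_convert number (number_convert number)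

-- ===== LEMMAS AND PROOFS =====

-- the bit value of a character
def pvBit (c : Char) : Int := if c = '1' then 1 else 0

-- little-endian value of a char list
def pvValLE : List Char → Int
  | [] => 0
  | c :: t => pvBit c + 2 * pvValLE t

-- A's loop produces exactly B's digit list (prefixed with the final f'{number}')
theorem aLoop_eq_bDigits (n : Int) (acc : List Char) :
    PySem.Int.toChars (aLoop n acc).1 ++ (aLoop n acc).2 = bDigits n ++ acc := by
  induction n, acc using aLoop.induct with
  | case1 n acc h ih =>
      rw [aLoop, if_pos h, bDigits, if_pos h, ih, List.append_assoc]
  | case2 n acc h =>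
      rw [aLoop, if_neg h, bDigits, if_neg h]

-- the conditional fold is a sum
theorem fold_pow_eq_sum (R : List Char) (l : List Nat) (a : Int) :
    l.foldl (fun d i => if R.getD i ' ' = '1' then 2 ^ i + d else d) a
      = a + (l.map (fun i => if R.getD i ' ' = '1' then (2:Int) ^ i else 0)).sum := by
  induction l generalizing a with
  | nil => simp
  | cons x t ih =>
      simp only [List.foldl_cons, List.map_cons, List.sum_cons, ih]
      split <;> ring

-- the indexed power sum over a list is its little-endian value
theorem sum_range_eq_valLE (R : List Char) :
    ((List.range R.length).map (fun i => if R.getD i ' ' = '1' then (2:Int) ^ i else 0)).sum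
      = pvValLE R := by
  induction R with
  | nil => simp [pvValLE]
  | cons c t ih =>
      rw [List.length_cons, List.range_succ_eq_map, List.map_cons, List.map_map, List.sum_cons]
      have : ((List.range t.length).map
          ((fun i => if (c :: t).getD i ' ' = '1' then (2:Int) ^ i else 0) ∘ (· + 1))).sum
          = 2 * ((List.range t.length).map
              (fun i => if t.getD i ' ' = '1' then (2:Int) ^ i else 0)).sum := by
        rw [← List.sum_map_mul_left]
        congr 1
        apply List.map_congr_left
        intro i _
        simp only [Function.comp, List.getD_cons_succ]
        split <;> ring
      rw [this, ih, pvValLE, pvBit, List.getD_cons_zero]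
      split <;> ring

theorem valLE_append_singleton (L : List Char) (c : Char) :
    pvValLE (L ++ [c]) = pvValLE L + pvBit c * 2 ^ L.length := by
  induction L with
  | nil => simp [pvValLE, pvBit]
  | cons d t ih => simp [pvValLE, ih]; ring

-- Horner fold with a nonzero accumulator
theorem horner_shift (L : List Char) (d : Int) :
    L.foldl (fun d ch => d * 2 + (if ch = '1' then 1 else 0)) d
      = d * 2 ^ L.length + L.foldl (fun d ch => d * 2 + (if ch = '1' then 1 else 0)) 0 := by
  induction L generalizing d with
  | nil => simp
  | cons c t ih =>
      simp only [List.foldl_cons, List.length_cons]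
      rw [ih (d * 2 + _)]
      conv_rhs => rw [ih (0 * 2 + _)]
      ring

-- the Horner pass computes the little-endian value of the reversed list
theorem horner_eq_valLE_reverse (L : List Char) :
    L.foldl (fun d ch => d * 2 + (if ch = '1' then 1 else 0)) 0 = pvValLE L.reverse := by
  induction L with
  | nil => simp [pvValLE]
  | cons c t ih =>
      rw [List.reverse_cons, valLE_append_singleton, ← ih, List.foldl_cons,
        horner_shift, List.length_reverse, pvBit]
      ring

-- ===== VERDICT (by name: the statement is the Claim_ definition above) =====
theorem number_convert_spec : Claim_equal_number_convert := by
  intro number _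
  show _ = _
  unfold number_convert number_convert_alt
  simp only
  have hbin : PySem.Int.toChars (aLoop number []).1 ++ (aLoop number []).2 = bDigits number := by
    simpa using aLoop_eq_bDigits number []
  rw [hbin, fold_pow_eq_sum, zero_add]
  rw [List.length_reverse]
  have : (bDigits number).reverse.length = (bDigits number).length := List.length_reverse
  rw [← this, sum_range_eq_valLE, ← horner_eq_valLE_reverse]
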